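-- pv_equiv track=rewrite | github.com/cutterdawes/H-Probes | scripts/probe_geometry_combo.py | _path_indices
-- ===== SOURCE A (Python) =====
-- def _path_indices(node_ids_example, parsed_path, label_mapping):
--     inverse_label = {int(label): idx for idx, label in enumerate(label_mapping)} if label_mapping else {}
--     path_node_ids = []
--     for tok in parsed_path:
--         try:
--             label_val = int(tok)
--             canonical_id = inverse_label.get(label_val, label_val)
--             path_node_ids.append(int(canonical_id))
--         except Exception:
--             continue
--
--     path_indices = []
--     if path_node_ids:
--         node_ids_list = [int(nid) for nid in node_ids_example]
--         if node_ids_list[: len(path_node_ids)] == path_node_ids: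
--             path_indices = list(range(len(path_node_ids)))
--         else:
--             ptr = 0
--             for idx, nid in enumerate(node_ids_list):
--                 if ptr < len(path_node_ids) and nid == path_node_ids[ptr]:
--                     path_indices.append(idx)
--                     ptr += 1
--     return path_node_ids, path_indices
-- ===== SOURCE B (Python) =====
-- def _path_indices(node_ids_example, parsed_path, label_mapping):
--     inverse_label = {int(label): idx for idx, label in enumerate(label_mapping)} if label_mapping else {}
--     path_node_ids = []
--     for tok in parsed_path:
--         try:
--             v = int(tok)
--         except ValueError:
--             continue
--         path_node_ids.append(int(inverse_label.get(v, v)))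
--
--     # occurrence index: node id -> ascending list of positions; then per target a
--     # binary search finds the first occurrence past the previously matched position
--     occ = {}
--     for idx, nid in enumerate(node_ids_example):
--         occ.setdefault(int(nid), []).append(idx)
--
--     path_indices = []
--     prev = -1
--     for target in path_node_ids:
--         positions = occ.get(target, [])
--         lo, hi = 0, len(positions)
--         while lo < hi:  # hand-rolled bisect_right(positions, prev)
--             mid = (lo + hi) // 2
--             if positions[mid] <= prev:
--                 lo = mid + 1
--             else:
--                 hi = mid
--         if lo == len(positions):
--             break
--         prev = positions[lo]
--         path_indices.append(prev)
--     return path_node_ids, path_indices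
-- ===== Notes on version B (the rewrite author's own statement) =====
-- stated objective: alternative
-- what changed: Replaced A's single pointer-guarded scan of the node list (plus its redundant prefix fast-path) by an inverted index: one pass builds a dict from node id to its ascending occurrence positions, then each path target is resolved with a hand-rolled bisect_right binary search for the first occurrence past the previously matched position, breaking when none exists.
-- outside the precondition, e.g. on _path_indices([1], ['1'], ['x']): A raises ValueError, B raises ValueError
import Mathlib
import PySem

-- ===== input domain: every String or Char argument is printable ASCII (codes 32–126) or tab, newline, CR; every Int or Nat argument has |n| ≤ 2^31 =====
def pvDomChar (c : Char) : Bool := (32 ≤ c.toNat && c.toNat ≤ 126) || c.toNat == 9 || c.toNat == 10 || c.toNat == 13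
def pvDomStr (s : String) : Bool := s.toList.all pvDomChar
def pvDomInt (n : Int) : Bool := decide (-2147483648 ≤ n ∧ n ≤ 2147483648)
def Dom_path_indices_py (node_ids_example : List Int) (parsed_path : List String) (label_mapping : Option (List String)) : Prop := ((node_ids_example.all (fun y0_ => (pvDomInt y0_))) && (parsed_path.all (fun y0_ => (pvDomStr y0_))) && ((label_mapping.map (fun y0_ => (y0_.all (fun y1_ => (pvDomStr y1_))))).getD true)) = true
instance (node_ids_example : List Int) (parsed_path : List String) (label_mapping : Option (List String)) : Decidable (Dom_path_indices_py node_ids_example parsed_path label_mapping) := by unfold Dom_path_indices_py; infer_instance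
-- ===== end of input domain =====

-- B replaces A's pointer-guarded forward scan (and its redundant prefix fast-path) by an inverted
-- occurrence index (node id -> ascending positions) queried per target with a hand-rolled
-- bisect_right binary search (objective: alternative; return value proved equal under Pre_).

-- ===== PORT A =====
-- shared by both ports: both Pythons build the inverse-label dict with the identical comprehension
-- {int(label): idx for idx, label in enumerate(label_mapping)} if label_mapping else {}
def pvInverseLabel (label_mapping : Option (List String)) : PySem.Dict Int Int :=
  match label_mapping with
  | none => PySem.Dict.empty
  | some ls =>
      if ls = [] then PySem.Dict.empty
      else (PySem.List.enumerate ls).foldl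
        -- int(label): exact under Pre_ (every label parses); getD 0 is never the raising case there
        (fun d p => d.insert ((PySem.Int.ofStr? p.2).getD 0) p.1) PySem.Dict.empty

def path_indices_py (node_ids_example : List Int) (parsed_path : List String) (label_mapping : Option (List String)) : List Int × List Int :=
  let inverse_label := pvInverseLabel label_mapping
  -- for tok in parsed_path: try int(tok) … except: continue
  let path_node_ids : List Int := parsed_path.foldl
    (fun acc tok =>
      match PySem.Int.ofStr? tok with
      | none => acc
      | some v => acc ++ [inverse_label.getD v v]) []
  let path_indices : List Int :=
    if path_node_ids = [] then []
    else
      let node_ids_list := node_ids_example   -- [int(nid) for nid in …] is the identity on List Int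
      if node_ids_list.take path_node_ids.length = path_node_ids then
        PySem.List.pyRange 0 (path_node_ids.length : Int) 1   -- list(range(len(path_node_ids)))
      else
        -- ptr-guarded scan; getD is guarded by st.2 < length, so it is exactly path_node_ids[ptr]
        ((PySem.List.enumerate node_ids_list).foldl
          (fun (st : List Int × Nat) p =>
            if st.2 < path_node_ids.length ∧ p.2 = path_node_ids.getD st.2 0
            then (st.1 ++ [p.1], st.2 + 1) else st) ([], 0)).1
  (path_node_ids, path_indices)

-- ===== PORT B =====
-- occ.setdefault(int(nid), []).append(idx): append idx to the bucket of nid (modify is exact: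
-- same buckets, same key order)
def pvOcc (nodes : List Int) : PySem.Dict Int (List Int) :=
  (PySem.List.enumerate nodes).foldl
    (fun d p => d.modify p.2 [] (· ++ [p.1])) PySem.Dict.empty

-- the while-loop bisect_right: lo/hi are Nat (Python keeps them in 0..len, so // is Nat division);
-- positions[mid] is in range whenever the loop body runs from the initial call, so getD is exact;
-- the loop is made structural with fuel = hi - lo (the gap shrinks every iteration)
def pvBisectGo : Nat → List Int → Int → Nat → Nat → Nat
  | 0, _, _, lo, _ => lo
  | fuel + 1, positions, prev, lo, hi =>
    if lo < hi then
      -- mid = (lo + hi) // 2, inlined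
      if positions.getD ((lo + hi) / 2) 0 ≤ prev then
        pvBisectGo fuel positions prev ((lo + hi) / 2 + 1) hi
      else pvBisectGo fuel positions prev lo ((lo + hi) / 2)
    else lo

def pvBisect (positions : List Int) (prev : Int) (lo hi : Nat) : Nat :=
  pvBisectGo (hi - lo) positions prev lo hi

-- for target in path_node_ids: bisect, break on exhaustion, else append positions[lo]
def pvLoopB (occ : PySem.Dict Int (List Int)) : List Int → Int → List Int
  | [], _ => []
  | t :: ts, prev =>
      let positions := occ.getD t []
      let lo := pvBisect positions prev 0 positions.length
      if lo = positions.length then []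
      else positions.getD lo 0 :: pvLoopB occ ts (positions.getD lo 0)

def path_indices_py_alt (node_ids_example : List Int) (parsed_path : List String) (label_mapping : Option (List String)) : List Int × List Int :=
  let inverse_label := pvInverseLabel label_mapping
  -- for tok in parsed_path: try v = int(tok) except ValueError: continue; append(int(get(v, v)))
  let path_node_ids : List Int := parsed_path.foldl
    (fun acc tok =>
      match PySem.Int.ofStr? tok with
      | none => acc
      | some v => acc ++ [inverse_label.getD v v]) []
  (path_node_ids, pvLoopB (pvOcc node_ids_example) path_node_ids (-1))

-- ===== PRECONDITION & SPEC =====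
-- Pre_ excludes only inputs where Python A raises ValueError: a non-empty label_mapping containing
-- a string that int() rejects (B raises there too).
def Pre_path_indices_py (node_ids_example : List Int) (parsed_path : List String) (label_mapping : Option (List String)) : Prop :=
  ∀ s ∈ label_mapping.getD [], (PySem.Int.ofStr? s).isSome = true
instance (node_ids_example : List Int) (parsed_path : List String) (label_mapping : Option (List String)) : Decidable (Pre_path_indices_py node_ids_example parsed_path label_mapping) := by unfold Pre_path_indices_py; infer_instance

def pvWitness_path_indices_py : List Int × List String × Option (List String) :=
  ([7, 1, 2], ["1", "x", "2"], some ["1", "2"])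

def Spec_path_indices_py (node_ids_example : List Int) (parsed_path : List String) (label_mapping : Option (List String)) (out : List Int × List Int) : Prop := out = path_indices_py_alt node_ids_example parsed_path label_mapping
instance (node_ids_example : List Int) (parsed_path : List String) (label_mapping : Option (List String)) (out : List Int × List Int) : Decidable (Spec_path_indices_py node_ids_example parsed_path label_mapping out) := by unfold Spec_path_indices_py; infer_instance

-- ===== CLAIM (what is proved, stated in full; the proofs are below) =====
def Claim_equal_path_indices_py : Prop := ∀ (node_ids_example : List Int) (parsed_path : List String) (label_mapping : Option (List String)), Dom_path_indices_py node_ids_example parsed_path label_mapping → Pre_path_indices_py node_ids_example parsed_path label_mapping → Spec_path_indices_py node_ids_example parsed_path label_mapping (path_indices_py node_ids_example parsed_path label_mapping)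

-- ===== LEMMAS AND PROOFS =====

-- reference greedy matcher both ports are reduced to: scan the nodes once, index s,
-- match the targets in order, stop (forever) at the first unmatched target
def pvG : List Int → List Int → Int → List Int
  | [], _, _ => []
  | _ :: _, [], _ => []
  | t :: ts, n :: ns, s => if n = t then s :: pvG ts ns (s + 1) else pvG (t :: ts) ns (s + 1)
termination_by l₁ l₂ _ => (l₁.length, l₂.length)

theorem pvG_nil (ns : List Int) (s : Int) : pvG [] ns s = [] := by
  cases ns <;> simp [pvG]

theorem pvG_nil_right (t : Int) (ts : List Int) (s : Int) : pvG (t :: ts) [] s = [] := by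
  simp [pvG]

theorem pvG_cons (t n : Int) (ts ns : List Int) (s : Int) :
    pvG (t :: ts) (n :: ns) s
      = if n = t then s :: pvG ts ns (s + 1) else pvG (t :: ts) ns (s + 1) := by
  simp [pvG]

-- ascending positions of t in ns, indexing from s
def pvPos (ns : List Int) (s : Int) (t : Int) : List Int :=
  ((PySem.List.enumerate ns s).filter (fun p => p.2 == t)).map (·.1)

theorem pvPos_nil (s t : Int) : pvPos [] s t = [] := rfl

theorem pvPos_cons (n : Int) (ns : List Int) (s t : Int) :
    pvPos (n :: ns) s t = if n = t then s :: pvPos ns (s + 1) t else pvPos ns (s + 1) t := by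
  simp only [pvPos, PySem.List.enumerate_cons, List.filter_cons]
  by_cases h : n = t <;> simp [h]

theorem mem_pvPos_ge (ns : List Int) (t : Int) :
    ∀ (s : Int) (x : Int), x ∈ pvPos ns s t → s ≤ x := by
  induction ns with
  | nil => intro s x hx; simp [pvPos_nil] at hx
  | cons n ns ih =>
      intro s x hx
      rw [pvPos_cons] at hx
      by_cases h : n = t
      · rw [if_pos h] at hx
        rcases List.mem_cons.1 hx with h1 | h1
        · omega
        · have := ih (s + 1) x h1; omega
      · rw [if_neg h] at hx
        have := ih (s + 1) x hx; omega

theorem pvPos_pairwise (ns : List Int) (t : Int) :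
    ∀ (s : Int), (pvPos ns s t).Pairwise (· ≤ ·) := by
  induction ns with
  | nil => intro s; simp [pvPos_nil]
  | cons n ns ih =>
      intro s
      rw [pvPos_cons]
      by_cases h : n = t
      · rw [if_pos h]
        refine List.pairwise_cons.2 ⟨fun x hx => ?_, ih (s + 1)⟩
        have := mem_pvPos_ge ns t (s + 1) x hx; omega
      · rw [if_neg h]; exact ih (s + 1)

-- the occurrence dict looks up exactly the position list
theorem pvOcc_getD (nodes : List Int) (t : Int) :
    (pvOcc nodes).getD t [] = pvPos nodes 0 t := by
  unfold pvOcc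
  have hfold :
      (PySem.List.enumerate nodes 0).foldl
          (fun d p => d.modify p.2 [] (· ++ [p.1])) PySem.Dict.empty
        = ((PySem.List.enumerate nodes 0).map (fun p => (p.2, p.1))).foldl
            (fun d q => d.modify q.1 [] (· ++ [q.2])) PySem.Dict.empty := by
    rw [List.foldl_map]
  rw [hfold, PySem.Dict.getD_foldl_modify_append]
  simp [pvPos, List.filter_map, Function.comp_def]

-- the hand-rolled bisect lands on c whenever c separates the ≤-prev prefix from the >-prev suffix
theorem pvBisectGo_eq (positions : List Int) (prev : Int) (c : Nat)
    (h1 : ∀ (i : Nat) (h : i < positions.length), i < c → positions[i] ≤ prev)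
    (h2 : ∀ (i : Nat) (h : i < positions.length), c ≤ i → prev < positions[i]) :
    ∀ (fuel lo hi : Nat), hi - lo ≤ fuel → lo ≤ c → c ≤ hi → hi ≤ positions.length →
      pvBisectGo fuel positions prev lo hi = c := by
  intro fuel
  induction fuel with
  | zero =>
      intro lo hi hf hlo hhi hlen
      rw [pvBisectGo]
      omega
  | succ m ih =>
      intro lo hi hf hlo hhi hlen
      rw [pvBisectGo]
      by_cases hlt : lo < hi
      · rw [if_pos hlt]
        have hmid1 : lo ≤ (lo + hi) / 2 := by omega
        have hmid2 : (lo + hi) / 2 < hi := by omega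
        have hmr : (lo + hi) / 2 < positions.length := by omega
        rw [List.getD_eq_getElem positions 0 hmr]
        by_cases hle : positions[(lo + hi) / 2] ≤ prev
        · rw [if_pos hle]
          have hc : (lo + hi) / 2 < c := by
            by_contra hcon
            exact absurd (h2 _ hmr (by omega)) (by omega)
          exact ih _ _ (by omega) (by omega) hhi hlen
        · rw [if_neg hle]
          have hc : c ≤ (lo + hi) / 2 := by
            by_contra hcon
            exact absurd (h1 _ hmr (by omega)) hle
          exact ih _ _ (by omega) hlo hc (by omega)
      · rw [if_neg hlt]; omega

theorem pvBisect_eq (positions : List Int) (prev : Int) (c : Nat)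
    (h1 : ∀ (i : Nat) (h : i < positions.length), i < c → positions[i] ≤ prev)
    (h2 : ∀ (i : Nat) (h : i < positions.length), c ≤ i → prev < positions[i])
    (lo hi : Nat) (hlo : lo ≤ c) (hhi : c ≤ hi) (hlen : hi ≤ positions.length) :
    pvBisect positions prev lo hi = c :=
  pvBisectGo_eq positions prev c h1 h2 (hi - lo) lo hi (le_refl _) hlo hhi hlen

-- the takeWhile length is such a separator on a sorted list
theorem takeWhile_bounds (prev : Int) :
    ∀ (positions : List Int), positions.Pairwise (· ≤ ·) →
      ((positions.takeWhile (fun x => decide (x ≤ prev))).length ≤ positions.length) ∧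
      (∀ (i : Nat) (h : i < positions.length),
        i < (positions.takeWhile (fun x => decide (x ≤ prev))).length → positions[i] ≤ prev) ∧
      (∀ (i : Nat) (h : i < positions.length),
        (positions.takeWhile (fun x => decide (x ≤ prev))).length ≤ i → prev < positions[i]) := by
  intro positions
  induction positions with
  | nil => intro _; refine ⟨by simp, ?_, ?_⟩ <;> intro i h <;> simp at h
  | cons p ps ih =>
      intro hp
      rcases List.pairwise_cons.1 hp with ⟨hhead, hps⟩
      rcases ih hps with ⟨ihl, ih1, ih2⟩
      by_cases hle : p ≤ prev
      · rw [List.takeWhile_cons, if_pos (by simpa using hle)]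
        refine ⟨by simp only [List.length_cons]; omega, ?_, ?_⟩
        · intro i h hi
          cases i with
          | zero => simpa using hle
          | succ j =>
              simp only [List.length_cons] at h hi
              simp only [List.getElem_cons_succ]
              exact ih1 j (by omega) (by omega)
        · intro i h hi
          cases i with
          | zero => simp at hi
          | succ j =>
              simp only [List.length_cons] at h hi
              simp only [List.getElem_cons_succ]
              exact ih2 j (by omega) (by omega)
      · rw [List.takeWhile_cons, if_neg (by simpa using hle)]
        refine ⟨by simp, ?_, ?_⟩
        · intro i h hi; simp at hi
        · intro i h _
          cases i with
          | zero => simpa using lt_of_not_ge hle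
          | succ j =>
              simp only [List.length_cons] at h
              simp only [List.getElem_cons_succ]
              have hj : j < ps.length := by omega
              have : p ≤ ps[j] := hhead _ (List.getElem_mem hj)
              omega

-- suffix positions are the dropWhile of the full position list
theorem pvPos_drop (t : Int) :
    ∀ (k : Nat) (ns : List Int) (s : Int),
      pvPos (ns.drop k) (s + k) t
        = (pvPos ns s t).dropWhile (fun x => decide (x ≤ s + k - 1)) := by
  intro k
  induction k with
  | zero =>
      intro ns s
      simp only [List.drop_zero, Nat.cast_zero, add_zero]
      have : ∀ (l : List Int), (∀ x ∈ l, s ≤ x) →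
          l.dropWhile (fun x => decide (x ≤ s - 1)) = l := by
        intro l hl
        cases l with
        | nil => rfl
        | cons a l' =>
            rw [List.dropWhile_cons, if_neg]
            simp only [decide_eq_true_eq]
            have := hl a (by simp); omega
      exact (this _ (mem_pvPos_ge ns t s)).symm
  | succ m ih =>
      intro ns s
      cases ns with
      | nil => simp [pvPos_nil]
      | cons n ns' =>
          have hL : ((n :: ns').drop (m + 1)) = ns'.drop m := rfl
          rw [hL, pvPos_cons]
          have hcast : s + ((m : Int) + 1) = (s + 1) + (m : Int) := by ring
          by_cases h : n = t
          · rw [if_pos h, List.dropWhile_cons,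
              if_pos (by simp only [decide_eq_true_eq]; omega)]
            push_cast
            rw [hcast, ← ih ns' (s + 1)]
          · rw [if_neg h]
            push_cast
            rw [hcast, ← ih ns' (s + 1)]

-- pvG on a node list with no occurrence of the head target is empty
theorem pvG_of_pos_nil (t : Int) (ts : List Int) :
    ∀ (ns : List Int) (s : Int), pvPos ns s t = [] → pvG (t :: ts) ns s = [] := by
  intro ns
  induction ns with
  | nil => intro s _; exact pvG_nil_right t ts s
  | cons n ns' ih =>
      intro s hpos
      rw [pvPos_cons] at hpos
      by_cases h : n = t
      · rw [if_pos h] at hpos; simp at hpos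
      · rw [if_neg h] at hpos
        rw [pvG_cons, if_neg h]
        exact ih (s + 1) hpos

-- pvG steps to the head of the position list
theorem pvG_step (t : Int) (ts : List Int) :
    ∀ (ns : List Int) (s i : Int) (rest : List Int), pvPos ns s t = i :: rest →
      pvG (t :: ts) ns s = i :: pvG ts (ns.drop ((i - s).toNat + 1)) (i + 1) := by
  intro ns
  induction ns with
  | nil => intro s i rest h; simp [pvPos_nil] at h
  | cons n ns' ih =>
      intro s i rest hpos
      rw [pvPos_cons] at hpos
      by_cases h : n = t
      · rw [if_pos h] at hpos
        have hi : i = s := (List.cons.injEq _ _ _ _ ▸ hpos).1.symm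
        subst hi
        rw [pvG_cons, if_pos h]
        simp
      · rw [if_neg h] at hpos
        rw [pvG_cons, if_neg h, ih (s + 1) i rest hpos]
        have hge : s + 1 ≤ i := by
          have : i ∈ pvPos ns' (s + 1) t := by rw [hpos]; simp
          exact mem_pvPos_ge ns' t (s + 1) i this
        have hdrop : (n :: ns').drop ((i - s).toNat + 1) = ns'.drop ((i - (s + 1)).toNat + 1) := by
          have : (i - s).toNat = (i - (s + 1)).toNat + 1 := by omega
          rw [this]
          rfl
        rw [hdrop]

-- B's loop equals the reference greedy matcher on the k-suffix
theorem pvLoopB_eq_pvG (nodes : List Int) :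
    ∀ (targets : List Int) (k : Nat),
      pvLoopB (pvOcc nodes) targets ((k : Int) - 1) = pvG targets (nodes.drop k) (k : Int) := by
  intro targets
  induction targets with
  | nil =>
      intro k
      rw [pvG_nil]
      rfl
  | cons t ts ih =>
      intro k
      rw [pvLoopB]
      simp only [pvOcc_getD]
      set P := pvPos nodes 0 t with hP
      have hsorted : P.Pairwise (· ≤ ·) := pvPos_pairwise nodes t 0
      obtain ⟨hcl, hb1, hb2⟩ := takeWhile_bounds ((k : Int) - 1) P hsorted
      set c := (P.takeWhile (fun x => decide (x ≤ (k : Int) - 1))).length with hc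
      have hbis : pvBisect P ((k : Int) - 1) 0 P.length = c :=
        pvBisect_eq P ((k : Int) - 1) c hb1 hb2 0 P.length (by omega) hcl (by omega)
      have hsuffix : pvPos (nodes.drop k) (k : Int) t
          = P.dropWhile (fun x => decide (x ≤ (k : Int) - 1)) := by
        have := pvPos_drop t k nodes 0
        simpa using this
      have hsplit := List.takeWhile_append_dropWhile
        (p := fun x => decide (x ≤ (k : Int) - 1)) (l := P)
      rw [hbis]
      by_cases hcend : c = P.length
      · rw [if_pos hcend]
        have hdw : P.dropWhile (fun x => decide (x ≤ (k : Int) - 1)) = [] := by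
          have hlen := congrArg List.length hsplit
          simp only [List.length_append] at hlen
          have : (P.dropWhile (fun x => decide (x ≤ (k : Int) - 1))).length = 0 := by omega
          exact List.length_eq_zero_iff.1 this
        rw [(pvG_of_pos_nil t ts (nodes.drop k) (k : Int) (by rw [hsuffix, hdw])).symm]
      · rw [if_neg hcend]
        have hclt : c < P.length := by omega
        -- the head of the dropWhile is P[c]
        have hdrop_eq : P.dropWhile (fun x => decide (x ≤ (k : Int) - 1)) = P.drop c := by
          conv_rhs => rw [← hsplit]
          rw [List.drop_append_of_le_length (by omega)]
          simp [hc]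
        have hpos : pvPos (nodes.drop k) (k : Int) t = P[c] :: P.drop (c + 1) := by
          rw [hsuffix, hdrop_eq, List.drop_eq_getElem_cons hclt]
        have hgetD : P.getD c 0 = P[c] := List.getD_eq_getElem P 0 hclt
        have hik : (k : Int) ≤ P[c] :=
          mem_pvPos_ge (nodes.drop k) t (k : Int) P[c] (by rw [hpos]; exact List.Mem.head _)
        have hi0 : (0 : Int) ≤ P[c] := by have := hik; omega
        rw [pvG_step t ts (nodes.drop k) (k : Int) P[c] (P.drop (c + 1)) hpos]
        rw [hgetD]
        congr 1
        have hdd : (nodes.drop k).drop ((P[c] - (k : Int)).toNat + 1)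
            = nodes.drop (P[c].toNat + 1) := by
          rw [List.drop_drop]
          congr 1
          omega
        rw [hdd, show P[c] + 1 = ((P[c].toNat + 1 : Nat) : Int) by omega]
        have hgoal := ih (P[c].toNat + 1)
        rw [show ((P[c].toNat + 1 : Nat) : Int) - 1 = P[c] by omega] at hgoal
        exact hgoal

-- A's pointer loop equals the reference greedy matcher
theorem pvLoopA_eq_pvG (targets : List Int) :
    ∀ (nodes : List Int) (s : Int) (ptr : Nat) (acc : List Int),
      ((PySem.List.enumerate nodes s).foldl
        (fun (st : List Int × Nat) p =>
          if st.2 < targets.length ∧ p.2 = targets.getD st.2 0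
          then (st.1 ++ [p.1], st.2 + 1) else st) (acc, ptr)).1
      = acc ++ pvG (targets.drop ptr) nodes s := by
  intro nodes
  induction nodes with
  | nil =>
      intro s ptr acc
      cases h : targets.drop ptr with
      | nil => simp [PySem.List.enumerate_nil, pvG_nil]
      | cons a l => simp [PySem.List.enumerate_nil, pvG_nil_right]
  | cons n rest ih =>
      intro s ptr acc
      rw [PySem.List.enumerate_cons, List.foldl_cons]
      by_cases h1 : ptr < targets.length
      · have hdrop : targets.drop ptr = targets[ptr] :: targets.drop (ptr + 1) :=
          List.drop_eq_getElem_cons h1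
        have hgetD : targets.getD ptr 0 = targets[ptr] := List.getD_eq_getElem _ _ h1
        by_cases h2 : n = targets[ptr]
        · rw [if_pos ⟨h1, by rw [hgetD]; exact h2⟩]
          rw [ih (s + 1) (ptr + 1) (acc ++ [s]), hdrop]
          rw [pvG_cons, if_pos h2]
          simp
        · rw [if_neg (by rintro ⟨_, he⟩; rw [hgetD] at he; exact h2 he)]
          rw [ih (s + 1) ptr acc, hdrop, pvG_cons, if_neg h2]
      · have hdrop : targets.drop ptr = [] := List.drop_eq_nil_of_le (by omega)
        rw [if_neg (by simp [h1]), ih (s + 1) ptr acc, hdrop, pvG_nil, pvG_nil]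
-- prefix fast-path: when the targets are a prefix of the nodes, the greedy match is a range
theorem pvG_prefix :
    ∀ (targets nodes : List Int) (s : Int),
      nodes.take targets.length = targets →
      pvG targets nodes s = PySem.List.pyRange s (s + targets.length) 1 := by
  intro targets
  induction targets with
  | nil =>
      intro nodes s _
      rw [pvG_nil]
      simp [PySem.List.pyRange_one_eq_nil (le_refl s)]
  | cons t ts ih =>
      intro nodes s hpre
      cases nodes with
      | nil => simp at hpre
      | cons n rest =>
          simp only [List.length_cons, List.take_succ_cons, List.cons.injEq] at hpre
          obtain ⟨hn, hrest⟩ := hpre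
          rw [pvG_cons, if_pos hn, ih rest (s + 1) hrest]
          rw [show s + ((t :: ts).length : Int) = (s + 1) + (ts.length : Int) by
            simp [List.length_cons]; ring]
          rw [PySem.List.pyRange_one_cons (by omega : s < s + 1 + (ts.length : Int))]

-- ===== VERDICT (by name: the statement is the Claim_ definition above) =====
theorem path_indices_py_spec : Claim_equal_path_indices_py := by
  intro nodes parsed lm _ _
  unfold Spec_path_indices_py path_indices_py path_indices_py_alt
  simp only []
  set targets := parsed.foldl
    (fun acc tok =>
      match PySem.Int.ofStr? tok with
      | none => acc
      | some v => acc ++ [(pvInverseLabel lm).getD v v]) [] with htargets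
  refine Prod.ext rfl ?_
  have hB : pvLoopB (pvOcc nodes) targets (-1) = pvG targets nodes 0 := by
    have := pvLoopB_eq_pvG nodes targets 0
    simpa using this
  by_cases hnil : targets = []
  · rw [hnil]
    simp [pvLoopB]
  · rw [if_neg hnil, hB]
    by_cases hpre : nodes.take targets.length = targets
    · rw [if_pos hpre, pvG_prefix targets nodes 0 hpre]
      simp
    · rw [if_neg hpre]
      have := pvLoopA_eq_pvG targets nodes 0 0 []
      simpa using this
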